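-- pv_equiv track=rewrite | github.com/ijlhjj/exams | python/src/exams/exams2/Exam115.py | sumDistance
-- ===== SOURCE A (Python) =====
-- from typing import List
--
-- def sumDistance(nums: List[int], s: str, d: int) -> int:
--     # 机器人视为无差别的。当两个机器人相撞时，它们开始沿着原本相反的方向移动。
--     # 这两个限定叠加，可以忽略机器人的碰撞反向
--     # 根据运动方向和时间，确定所有机器人的最终坐标位置
--     numArr = []
--     for n, c in zip(nums, s):
--         if c == 'L':
--             numArr.append(n - d)
--         elif c == 'R':
--             numArr.append(n + d)
--
--     numArr.sort()
--
--     # 排序后计算坐标中最左机器人的所有两两距离之和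
--     currSum = 0
--     for i in range(1, len(numArr)):
--         currSum += numArr[i] - numArr[0]
--
--     # 每个机器人的两两距离之和都比相邻左侧机器人少： 相邻距离 * 左侧机器人两两距离数量
--     total = currSum
--     distance = len(numArr) - 1
--     for i in range(distance - 1):
--         currSum -= (numArr[i + 1] - numArr[i]) * distance
--         total += currSum
--         distance -= 1
--
--     # 按题目要求对 10^9 + 7 取余后返回
--     return total % (10 ** 9 + 7)
-- ===== SOURCE B (Python) =====
-- def sumDistance(nums, s, d):
--     arr = sorted(n - d if c == 'L' else n + d for n, c in zip(nums, s) if c in 'LR')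
--     total = prefix = 0
--     for i, x in enumerate(arr):
--         total += x * i - prefix
--         prefix += x
--     return total % (10 ** 9 + 7)
-- ===== Notes on version B (the rewrite author's own statement) =====
-- stated objective: simpler
-- what changed: Replaces A's two index loops (baseline distances from the leftmost robot, then incremental decrements with a shrinking multiplier) by the standard one-pass prefix-sum contribution formula total += arr[i]*i - prefix over the sorted positions.
import Mathlib
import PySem

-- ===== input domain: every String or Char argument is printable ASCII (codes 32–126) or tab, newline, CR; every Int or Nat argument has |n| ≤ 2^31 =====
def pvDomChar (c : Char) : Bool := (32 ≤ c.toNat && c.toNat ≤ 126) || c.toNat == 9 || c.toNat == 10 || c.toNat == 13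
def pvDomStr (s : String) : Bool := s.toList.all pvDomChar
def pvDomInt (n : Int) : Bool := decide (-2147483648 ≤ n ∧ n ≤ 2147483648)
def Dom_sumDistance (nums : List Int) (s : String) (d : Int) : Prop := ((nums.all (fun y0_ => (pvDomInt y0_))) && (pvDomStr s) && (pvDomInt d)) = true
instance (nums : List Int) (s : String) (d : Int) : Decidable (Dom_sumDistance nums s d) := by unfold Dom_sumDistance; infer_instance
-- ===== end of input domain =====

-- B replaces A's two-loop incremental scheme by the one-pass prefix-sum contribution formula (simpler; same O(n log n) cost).

-- ===== PORT A =====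
def sumDistance (nums : List Int) (s : String) (d : Int) : Int :=
  -- numArr built by appending n-d for 'L', n+d for 'R', skipping other chars
  let numArr := (nums.zip s.toList).foldl
    (fun acc nc => if nc.2 = 'L' then acc ++ [nc.1 - d]
                   else if nc.2 = 'R' then acc ++ [nc.1 + d] else acc) []
  let arr := PySem.List.sorted numArr id
  let n : Int := arr.length
  -- for i in range(1, len(numArr)): currSum += numArr[i] - numArr[0]   (indices in range)
  let currSum := (PySem.List.pyRange 1 n 1).foldl
    (fun cs i => cs + (PySem.List.pyGetD arr i 0 - PySem.List.pyGetD arr 0 0)) 0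
  -- for i in range(distance - 1): state = (currSum, total, distance)
  let st := (PySem.List.pyRange 0 (n - 1 - 1) 1).foldl
    (fun (st : Int × Int × Int) i =>
      let cs := st.1 - (PySem.List.pyGetD arr (i + 1) 0 - PySem.List.pyGetD arr i 0) * st.2.2
      (cs, st.2.1 + cs, st.2.2 - 1))
    (currSum, currSum, n - 1)
  PySem.Int.mod st.2.1 (10 ^ 9 + 7)

-- ===== PORT B =====
def sumDistance_alt (nums : List Int) (s : String) (d : Int) : Int :=
  let arr := PySem.List.sorted
    ((nums.zip s.toList).filterMap
      (fun nc => if nc.2 = 'L' then some (nc.1 - d)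
                 else if nc.2 = 'R' then some (nc.1 + d) else none)) id
  let st := (PySem.List.enumerate arr 0).foldl
    (fun (tp : Int × Int) ix => (tp.1 + ix.2 * ix.1 - tp.2, tp.2 + ix.2)) (0, 0)
  PySem.Int.mod st.1 (10 ^ 9 + 7)

-- ===== PRECONDITION & SPEC =====
def Spec_sumDistance (nums : List Int) (s : String) (d : Int) (out : Int) : Prop := out = sumDistance_alt nums s d
instance (nums : List Int) (s : String) (d : Int) (out : Int) : Decidable (Spec_sumDistance nums s d out) := by unfold Spec_sumDistance; infer_instance

-- ===== CLAIM (what is proved, stated in full; the proofs are below) =====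
def Claim_equal_sumDistance : Prop := ∀ (nums : List Int) (s : String) (d : Int), Dom_sumDistance nums s d → Spec_sumDistance nums s d (sumDistance nums s d)

-- ===== LEMMAS AND PROOFS =====

-- G l = sum of (x - head) over the tail of l
def pvG : List Int → Int
  | [] => 0
  | a :: t => t.sum - a * t.length

-- H l = sum over i < j of (l[j] - l[i])
def pvH : List Int → Int
  | [] => 0
  | a :: t => pvH t + t.sum - a * t.length

theorem pvBuild_eq (d : Int) (l : List (Int × Char)) (acc : List Int) :
    l.foldl (fun acc nc => if nc.2 = 'L' then acc ++ [nc.1 - d]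
                           else if nc.2 = 'R' then acc ++ [nc.1 + d] else acc) acc
    = acc ++ l.filterMap (fun nc => if nc.2 = 'L' then some (nc.1 - d)
                                    else if nc.2 = 'R' then some (nc.1 + d) else none) := by
  induction l generalizing acc with
  | nil => simp
  | cons hd tl ih =>
    simp only [List.foldl_cons, List.filterMap_cons]
    split_ifs <;> simp [ih]

theorem pvFoldSub (h : Int) (l : List Int) (c : Int) :
    l.foldl (fun acc x => acc + (x - h)) c = c + l.sum - h * l.length := by
  induction l generalizing c with
  | nil => simp
  | cons a t ih => simp only [List.foldl_cons, ih, List.sum_cons, List.length_cons]; push_cast; ring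

theorem pvFirstLoop (arr : List Int) :
    (PySem.List.pyRange 1 (arr.length : Int) 1).foldl
      (fun cs i => cs + (PySem.List.pyGetD arr i 0 - PySem.List.pyGetD arr 0 0)) 0 = pvG arr := by
  cases arr with
  | nil => simp [PySem.List.pyRange_one_eq_nil, pvG]
  | cons a t =>
    rw [PySem.List.foldl_pyRange_pyGetD' (a :: t) 0
          (fun acc x => acc + (x - PySem.List.pyGetD (a :: t) 0 0)) 0 (by norm_num)]
    simp only [PySem.List.pyGetD_zero_cons]
    simpa [pvG] using pvFoldSub a t 0

theorem pvH_cons (a : Int) (t : List Int) : pvH (a :: t) = pvG (a :: t) + pvH t := by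
  simp [pvH, pvG]; ring

theorem pvSecondLoop (arr : List Int) (t0 : Int) (m : Nat) (hm : m + 1 ≤ arr.length) :
    (PySem.List.pyRange 0 (m : Int) 1).foldl
      (fun (st : Int × Int × Int) i =>
        let cs := st.1 - (PySem.List.pyGetD arr (i + 1) 0 - PySem.List.pyGetD arr i 0) * st.2.2
        (cs, st.2.1 + cs, st.2.2 - 1))
      (pvG arr, t0, (arr.length : Int) - 1)
    = (pvG (arr.drop m), t0 + pvH (arr.drop 1) - pvH (arr.drop (m + 1)),
       (arr.length : Int) - 1 - m) := by
  induction m with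
  | zero =>
    simp [PySem.List.pyRange_one_eq_nil]
  | succ m ih =>
    have hm' : m + 1 ≤ arr.length := by omega
    have hmlt : m + 1 < arr.length := by omega
    have hcast : ((m + 1 : Nat) : Int) = (m : Int) + 1 := by push_cast; ring
    rw [hcast, PySem.List.pyRange_one_succ_right (by positivity), List.foldl_append, ih hm']
    have hdm : arr.drop m = arr[m] :: arr.drop (m + 1) :=
      List.drop_eq_getElem_cons (by omega)
    have hdm1 : arr.drop (m + 1) = arr[m + 1] :: arr.drop (m + 2) :=
      List.drop_eq_getElem_cons hmlt
    have hg1 : PySem.List.pyGetD arr ((m : Int)) 0 = arr[m] := by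
      rw [PySem.List.pyGetD_natCast]; exact List.getD_eq_getElem _ _ (by omega)
    have hg2 : PySem.List.pyGetD arr ((m : Int) + 1) 0 = arr[m + 1] := by
      rw [show ((m : Int) + 1) = ((m + 1 : Nat) : Int) by push_cast; ring,
          PySem.List.pyGetD_natCast]
      exact List.getD_eq_getElem _ _ hmlt
    have hlen1 : ((arr.drop (m + 1)).length : Int) = (arr.length : Int) - (m + 1) := by
      simp [List.length_drop]; omega
    have hlen2 : ((arr.drop (m + 2)).length : Int) = (arr.length : Int) - (m + 2) := by
      simp [List.length_drop]; omega
    have hsum : (arr.drop (m + 1)).sum = arr[m + 1] + (arr.drop (m + 2)).sum := by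
      rw [hdm1, List.sum_cons]
    simp only [List.foldl_cons, List.foldl_nil, hg1, hg2]
    have hcs : pvG (arr.drop m) -
        (arr[m + 1] - arr[m]) * ((arr.length : Int) - 1 - m) = pvG (arr.drop (m + 1)) := by
      rw [hdm, hdm1]
      simp only [pvG, List.sum_cons, List.length_cons]
      push_cast
      rw [hlen2]
      ring
    have hH : pvH (arr.drop (m + 1)) = pvG (arr.drop (m + 1)) + pvH (arr.drop (m + 2)) := by
      rw [hdm1, pvH_cons, ← hdm1]
    refine Prod.ext ?_ (Prod.ext ?_ ?_) <;> simp only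
    · exact hcs
    · rw [hcs, hH]; ring
    · ring

-- A's total (before the modulus) equals pvH of the sorted array.
theorem pvA_total (arr : List Int) :
    ((PySem.List.pyRange 0 ((arr.length : Int) - 1 - 1) 1).foldl
      (fun (st : Int × Int × Int) i =>
        let cs := st.1 - (PySem.List.pyGetD arr (i + 1) 0 - PySem.List.pyGetD arr i 0) * st.2.2
        (cs, st.2.1 + cs, st.2.2 - 1))
      (pvG arr, pvG arr, (arr.length : Int) - 1)).2.1 = pvH arr := by
  match arr with
  | [] => simp [PySem.List.pyRange_one_eq_nil, pvG, pvH]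
  | [a] => simp [PySem.List.pyRange_one_eq_nil, pvG, pvH]
  | a :: b :: t =>
    have hlen : (a :: b :: t).length = t.length + 2 := by simp
    have hb : ((a :: b :: t).length : Int) - 1 - 1 = ((t.length : Nat) : Int) := by
      rw [hlen]; push_cast; ring
    rw [hb, pvSecondLoop (a :: b :: t) (pvG (a :: b :: t)) t.length (by simp)]
    have hd : (a :: b :: t).drop (t.length + 1) = [(a :: b :: t).getLast (by simp)] := by
      have := List.drop_length_sub_one (l := a :: b :: t) (by simp)
      simpa [hlen, show t.length + 2 - 1 = t.length + 1 by omega] using this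
    simp only [hd, List.drop_one]
    have : pvH [(a :: b :: t).getLast (by simp)] = 0 := by simp [pvH]
    rw [this, pvH_cons]
    simp

-- B's total equals pvH of the array, from a generalized fold invariant.
theorem pvB_fold (l : List Int) (t p i : Int) :
    ((PySem.List.enumerate l i).foldl
      (fun (tp : Int × Int) ix => (tp.1 + ix.2 * ix.1 - tp.2, tp.2 + ix.2)) (t, p)).1
    = t + pvH l + i * l.sum - p * l.length := by
  induction l generalizing t p i with
  | nil => simp [PySem.List.enumerate_nil, pvH]
  | cons a tl ih =>
    rw [PySem.List.enumerate_cons, List.foldl_cons, ih]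
    simp only [pvH, List.sum_cons, List.length_cons]
    push_cast; ring

-- ===== VERDICT (by name: the statement is the Claim_ definition above) =====
theorem sumDistance_spec : Claim_equal_sumDistance := by
  intro nums s d _
  show sumDistance nums s d = sumDistance_alt nums s d
  unfold sumDistance sumDistance_alt
  rw [pvBuild_eq d (nums.zip s.toList) []]
  simp only [List.nil_append]
  set arr := PySem.List.sorted
    ((nums.zip s.toList).filterMap
      (fun nc => if nc.2 = 'L' then some (nc.1 - d)
                 else if nc.2 = 'R' then some (nc.1 + d) else none)) id with harr
  rw [pvFirstLoop arr, pvB_fold arr 0 0 0]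
  rw [pvA_total arr]
  ring_nf
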